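-- pv_equiv track=rewrite | github.com/BernardBot/adventofcode | 2020/day10/day10a.py | search
-- ===== SOURCE A (Python) =====
-- def search(x, rmain, difs):
--     if not rmain:
--         return difs
--
--     for a in [x+1,x+2,x+3]:
--         if a in rmain:
--             r = search(a, rmain - set([a]), difs + [a-x])
--
--             if r is not None:
--                 return r
-- ===== SOURCE B (Python) =====
-- def search(x, rmain, difs):
--     # the only chain of +1/+2/+3 steps from x covering all adapters is
--     # ascending order: sort, then check/collect consecutive differences.
--     out = list(difs)
--     prev = x
--     for a in sorted(set(rmain)):
--         d = a - prev
--         if d < 1 or d > 3: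
--             return None
--         out.append(d)
--         prev = a
--     return out
-- ===== Notes on version B (the rewrite author's own statement) =====
-- stated objective: simpler
-- what changed: Replaces the backtracking recursion over candidate next adapters (worst-case exponential) with a sort of the adapter set followed by a single linear scan collecting consecutive differences, using the fact that the only valid chain is ascending order.
import Mathlib
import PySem

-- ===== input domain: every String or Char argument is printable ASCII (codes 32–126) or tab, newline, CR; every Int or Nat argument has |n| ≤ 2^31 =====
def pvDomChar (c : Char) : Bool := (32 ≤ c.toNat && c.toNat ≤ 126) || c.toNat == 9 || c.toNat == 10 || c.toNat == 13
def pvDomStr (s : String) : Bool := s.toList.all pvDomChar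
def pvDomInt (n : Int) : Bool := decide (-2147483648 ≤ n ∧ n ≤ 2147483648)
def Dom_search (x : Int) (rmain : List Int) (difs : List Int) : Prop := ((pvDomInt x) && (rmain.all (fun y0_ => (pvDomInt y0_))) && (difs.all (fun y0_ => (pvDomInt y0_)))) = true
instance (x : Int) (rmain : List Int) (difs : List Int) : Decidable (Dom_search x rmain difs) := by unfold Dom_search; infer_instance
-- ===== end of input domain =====

-- B replaces A's backtracking recursion with a sort of the adapter set plus one scan of consecutive differences (objective: simpler).

-- ===== PORT A =====
-- termination helper for the recursion of `search`: rmain - {a} is strictly shorter when a ∈ rmain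
theorem pv_diff_len_lt (rmain : List Int) (a : Int) (h : a ∈ rmain) :
    (PySem.Set.diff rmain [a]).length < rmain.length := by
  simp only [PySem.Set.diff]
  apply List.length_filter_lt_length_iff_exists.mpr
  exact ⟨a, h, by simp⟩

-- literal port of A: if rmain empty return difs; else try a = x+1, x+2, x+3 in order,
-- recursing on rmain - {a} with difs + [a-x]; fall through to None (the implicit return)
def search (x : Int) (rmain : List Int) (difs : List Int) : Option (List Int) :=
  if rmain = [] then some difs
  else
    match (if h : x + 1 ∈ rmain then search (x + 1) (PySem.Set.diff rmain [x + 1]) (difs ++ [x + 1 - x]) else none) with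
    | some r => some r
    | none =>
      match (if h : x + 2 ∈ rmain then search (x + 2) (PySem.Set.diff rmain [x + 2]) (difs ++ [x + 2 - x]) else none) with
      | some r => some r
      | none =>
        match (if h : x + 3 ∈ rmain then search (x + 3) (PySem.Set.diff rmain [x + 3]) (difs ++ [x + 3 - x]) else none) with
        | some r => some r
        | none => none
termination_by rmain.length
decreasing_by
  · exact pv_diff_len_lt rmain (x + 1) h
  · exact pv_diff_len_lt rmain (x + 2) h
  · exact pv_diff_len_lt rmain (x + 3) h

-- ===== PORT B =====
-- the for-loop of Source B: walk the sorted adapters, appending each difference; early None on a bad gap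
def chainLoop (prev : Int) (s : List Int) (out : List Int) : Option (List Int) :=
  match s with
  | [] => some out
  | a :: rest =>
    let d := a - prev
    if d < 1 ∨ d > 3 then none
    else chainLoop a rest (out ++ [d])

def search_alt (x : Int) (rmain : List Int) (difs : List Int) : Option (List Int) :=
  chainLoop x (PySem.List.sorted (PySem.Set.ofList rmain) (fun v => v) false) difs

-- ===== PRECONDITION & SPEC =====
def Spec_search (x : Int) (rmain : List Int) (difs : List Int) (out : Option (List Int)) : Prop := out = search_alt x rmain difs
instance (x : Int) (rmain : List Int) (difs : List Int) (out : Option (List Int)) : Decidable (Spec_search x rmain difs out) := by unfold Spec_search; infer_instance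

-- ===== CLAIM (what is proved, stated in full; the proofs are below) =====
def Claim_equal_search : Prop := ∀ (x : Int) (rmain : List Int) (difs : List Int), Dom_search x rmain difs → Spec_search x rmain difs (search x rmain difs)

-- ===== LEMMAS AND PROOFS =====

-- A returns None as soon as some remaining adapter is ≤ x: every step strictly increases x,
-- so that adapter can never be consumed
theorem search_none_of_le (n : Nat) : ∀ (rmain : List Int), rmain.length ≤ n →
    ∀ (x : Int) (difs : List Int) (b : Int), b ∈ rmain → b ≤ x → search x rmain difs = none := by
  induction n with
  | zero =>
    intro rmain hl x difs b hb _
    rw [List.length_eq_zero_iff.mp (Nat.le_zero.mp hl)] at hb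
    simp at hb
  | succ n ih =>
    intro rmain hl x difs b hb hbx
    have hne : rmain ≠ [] := by rintro rfl; simp at hb
    have hbr : ∀ (a : Int), x < a →
        (if h : a ∈ rmain then search a (PySem.Set.diff rmain [a]) (difs ++ [a - x]) else none) = none := by
      intro a ha
      split
      · next hmem =>
        apply ih _ (by have := pv_diff_len_lt rmain a hmem; omega) a _ b
        · rw [PySem.Set.mem_diff]
          exact ⟨hb, by simp; omega⟩
        · omega
      · rfl
    rw [search, if_neg hne, hbr (x + 1) (by omega), hbr (x + 2) (by omega), hbr (x + 3) (by omega)]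

-- the head of sorted(set(rmain)) is a minimum element of rmain, and the list is strictly increasing
theorem sorted_set_spec (rmain : List Int) (m : Int) (t : List Int)
    (h : PySem.List.sorted (PySem.Set.ofList rmain) (fun v => v) false = m :: t) :
    m ∈ rmain ∧ (∀ b ∈ rmain, m ≤ b) ∧ (m :: t).Pairwise (· < ·) := by
  refine ⟨?_, ?_, ?_⟩
  · have : m ∈ m :: t := List.mem_cons_self
    rw [← h, PySem.List.mem_sorted, PySem.Set.mem_ofList] at this
    exact this
  · intro b hb
    exact PySem.List.key_head_sorted_le _ _ h b ((PySem.Set.mem_ofList rmain b).mpr hb)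
  · have := PySem.List.sorted_ofList_pairwise_lt (xs := rmain)
    rwa [h] at this

-- removing the minimum from the set removes exactly the head of the sorted list
theorem sorted_set_tail (rmain : List Int) (m : Int) (t : List Int)
    (h : PySem.List.sorted (PySem.Set.ofList rmain) (fun v => v) false = m :: t) :
    PySem.List.sorted (PySem.Set.ofList (PySem.Set.diff rmain [m])) (fun v => v) false = t := by
  obtain ⟨hm, hmin, hpw⟩ := sorted_set_spec rmain m t h
  have hmt : m ∉ t := by
    intro hc
    exact absurd (List.rel_of_pairwise_cons hpw hc) (lt_irrefl m)
  have htnd : t.Nodup := (List.pairwise_cons.mp hpw).2.nodup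
  apply PySem.List.sorted_eq_of_perm_of_pairwise_lt
  · rw [List.perm_ext_iff_of_nodup htnd (PySem.Set.nodup_ofList _)]
    intro b
    rw [PySem.Set.mem_ofList, PySem.Set.mem_diff]
    have hperm : (m :: t).Perm (PySem.Set.ofList rmain) := h ▸ PySem.List.sorted_perm _ _ _
    constructor
    · intro hb
      have hbm : b ≠ m := fun e => hmt (e ▸ hb)
      have : b ∈ PySem.Set.ofList rmain := hperm.mem_iff.mp (List.mem_cons_of_mem _ hb)
      rw [PySem.Set.mem_ofList] at this
      simp [this, hbm]
    · rintro ⟨hb, hbm⟩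
      have : b ∈ m :: t := hperm.mem_iff.mpr ((PySem.Set.mem_ofList rmain b).mpr hb)
      have hbm' : b ≠ m := by simpa using hbm
      rcases List.mem_cons.mp this with e | hbt
      · exact absurd e hbm'
      · exact hbt
  · exact (List.pairwise_cons.mp hpw).2

-- main invariant: A's backtracking search equals B's scan of sorted(set(rmain));
-- induction on the size of rmain, stepping both programs over the minimum adapter
theorem search_eq_chain (n : Nat) : ∀ (rmain : List Int), rmain.length ≤ n →
    ∀ (x : Int) (difs : List Int),
    search x rmain difs = chainLoop x (PySem.List.sorted (PySem.Set.ofList rmain) (fun v => v) false) difs := by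
  induction n with
  | zero =>
    intro rmain hl x difs
    rw [List.length_eq_zero_iff.mp (Nat.le_zero.mp hl)]
    rw [search]
    rfl
  | succ n ih =>
    intro rmain hl x difs
    by_cases hne : rmain = []
    · subst hne
      rw [search]
      rfl
    · obtain ⟨m, t, hS⟩ : ∃ m t, PySem.List.sorted (PySem.Set.ofList rmain) (fun v => v) false = m :: t := by
        cases hS' : PySem.List.sorted (PySem.Set.ofList rmain) (fun v => v) false with
        | nil =>
          exfalso
          rw [PySem.List.sorted_eq_nil_iff] at hS'
          rcases List.exists_mem_of_ne_nil rmain hne with ⟨c, hc⟩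
          have : c ∈ PySem.Set.ofList rmain := (PySem.Set.mem_ofList rmain c).mpr hc
          rw [hS'] at this
          simp at this
        | cons m t => exact ⟨m, t, rfl⟩
      obtain ⟨hm, hmin, hpw⟩ := sorted_set_spec rmain m t hS
      rw [hS]
      have hbr_gt : ∀ (a : Int), m < a →
          (if h : a ∈ rmain then search a (PySem.Set.diff rmain [a]) (difs ++ [a - x]) else none) = none := by
        intro a ha
        split
        · next hmem =>
          apply search_none_of_le n _ (by have := pv_diff_len_lt rmain a hmem; omega) a _ m
          · rw [PySem.Set.mem_diff]
            exact ⟨hm, by simp; omega⟩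
          · omega
        · rfl
      have hbr_lt : ∀ (a : Int), a < m →
          (if h : a ∈ rmain then search a (PySem.Set.diff rmain [a]) (difs ++ [a - x]) else none) = none := by
        intro a ha
        rw [dif_neg]
        intro hmem
        exact absurd (hmin a hmem) (by omega)
      by_cases hle : m ≤ x
      · rw [search_none_of_le (n + 1) rmain hl x difs m hm hle]
        rw [chainLoop]
        rw [if_pos (by omega : m - x < 1 ∨ m - x > 3)]
      · by_cases hbig : x + 3 < m
        · rw [search, if_neg hne, hbr_lt (x + 1) (by omega), hbr_lt (x + 2) (by omega),
              hbr_lt (x + 3) (by omega)]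
          rw [chainLoop]
          rw [if_pos (by omega : m - x < 1 ∨ m - x > 3)]
        · -- m ∈ {x+1, x+2, x+3}: A commits to the minimum m, B steps to the tail
          have hstep : search x rmain difs =
              search m (PySem.Set.diff rmain [m]) (difs ++ [m - x]) := by
            rcases (by omega : m = x + 1 ∨ m = x + 2 ∨ m = x + 3) with hk | hk | hk
            · subst hk
              rw [search, if_neg hne, dif_pos hm]
              cases hr : search (x + 1) (PySem.Set.diff rmain [x + 1]) (difs ++ [x + 1 - x]) with
              | some r => rfl
              | none => rw [hbr_gt (x + 2) (by omega), hbr_gt (x + 3) (by omega)]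
            · subst hk
              rw [search, if_neg hne, hbr_lt (x + 1) (by omega), dif_pos hm]
              cases hr : search (x + 2) (PySem.Set.diff rmain [x + 2]) (difs ++ [x + 2 - x]) with
              | some r => rfl
              | none => rw [hbr_gt (x + 3) (by omega)]
            · subst hk
              rw [search, if_neg hne, hbr_lt (x + 1) (by omega), hbr_lt (x + 2) (by omega),
                  dif_pos hm]
              cases hr : search (x + 3) (PySem.Set.diff rmain [x + 3]) (difs ++ [x + 3 - x]) with
              | some r => rfl
              | none => rfl
          rw [hstep]
          rw [ih _ (by have := pv_diff_len_lt rmain m hm; omega)]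
          rw [sorted_set_tail rmain m t hS]
          rw [chainLoop]
          rw [if_neg (by omega : ¬(m - x < 1 ∨ m - x > 3))]

-- ===== VERDICT (by name: the statement is the Claim_ definition above) =====
theorem search_spec : Claim_equal_search := by
  intro x rmain difs _
  unfold Spec_search search_alt
  exact search_eq_chain rmain.length rmain le_rfl x difs
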